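-- pv_equiv track=rewrite | github.com/spurthym/Leetcode | my-folder/problems/sum_of_number_and_its_reverse/solution.py | sumOfNumberAndReverse
-- ===== SOURCE A (Python) =====
-- def sumOfNumberAndReverse(num: int) -> bool:
--     if num==0:
--         return True
--     n=num//2
--
--     def rev(n):
--         r=0
--         while n!=0:
--             temp=n%10
--             r=r*10+temp
--             n=n//10
--         return r
--
--
--     for i in range(n,num):
--         x=rev(i)
--         if x + i == num:
--             return True
--     return False
-- ===== SOURCE B (Python) =====
-- def sumOfNumberAndReverse(num: int) -> bool:
--     # Digit-based search: num == i + rev(i) for some i with L digits iff the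
--     # digit sums s_j = a_j + a_(L-1-j) of i's digit string a form a palindromic
--     # sequence whose weighted sum is num.  Enumerate only the independent half
--     # of s (entries 0..18) per candidate length L, pruning negative remainders,
--     # instead of scanning every candidate i.
--     if num <= 0:
--         return num == 0
--     d = 0
--     t = num
--     while t > 0:
--         d += 1
--         t = t // 10
--     for L in range(1, d + 1):
--         h = L // 2
--         weights = [10 ** j + 10 ** (L - 1 - j) for j in range(h)]
--         if search(0, h, L, num, weights):
--             return True
--     return False
--
--
-- def search(j, h, L, rem, weights):
--     if rem < 0:
--         return False
--     if j >= h: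
--         if L % 2 == 1:
--             q = rem // (10 ** h)
--             return rem % (10 ** h) == 0 and q % 2 == 0 and q <= 18 and (L > 1 or q > 0)
--         return rem == 0
--     lo = 1 if j == 0 else 0
--     for s in range(lo, 19):
--         if search(j + 1, h, L, rem - s * weights[j], weights):
--             return True
--     return False
-- ===== Notes on version B (the rewrite author's own statement) =====
-- stated objective: faster
-- what changed: B replaces A's linear scan of every candidate i in [num//2, num) by a digit-level search: for each possible digit length L of i it enumerates only the palindromic digit-sum sequence s_j = a_j + a_(L-1-j) (19 choices per pair, half the positions, pruning negative remainders), so the cost depends on the digit count of num instead of on num itself.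
import Mathlib
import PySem

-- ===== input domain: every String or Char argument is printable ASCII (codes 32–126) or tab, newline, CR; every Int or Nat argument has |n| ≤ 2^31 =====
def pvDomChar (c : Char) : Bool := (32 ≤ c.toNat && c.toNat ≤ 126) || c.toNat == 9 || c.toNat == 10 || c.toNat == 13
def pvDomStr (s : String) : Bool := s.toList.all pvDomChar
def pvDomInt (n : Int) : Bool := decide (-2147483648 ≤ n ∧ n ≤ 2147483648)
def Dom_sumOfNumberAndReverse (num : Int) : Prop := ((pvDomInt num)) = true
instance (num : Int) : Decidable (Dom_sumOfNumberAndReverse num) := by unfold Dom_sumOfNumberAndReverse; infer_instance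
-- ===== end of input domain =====

-- B replaces A's linear scan of all i in [num//2, num) by a digit-level search over the
-- palindromic digit-sum sequences of the candidates, so its cost depends on the digit
-- count of num rather than on num itself (objective: faster).

-- ===== PORT A =====
-- A's inner 'rev': while n != 0: r = r*10 + n%10; n = n//10.  Inside A it is only
-- called on i ≥ 0 (the range is nonempty only when num ≥ 1, so 0 ≤ num//2 ≤ i); the
-- totalizing guard '0 < n' coincides with 'n != 0' on every reached call.
def revA (n r : Int) : Int :=
  if h : 0 < n then revA (PySem.Int.floordiv n 10) (r * 10 + PySem.Int.mod n 10) else r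
  termination_by n.toNat
  decreasing_by
    have h1 : PySem.Int.floordiv n 10 < n := by
      rw [PySem.Int.floordiv_lt_iff_lt_mul (by omega)]; omega
    have h2 : (0 : Int) ≤ PySem.Int.floordiv n 10 := by
      rw [PySem.Int.le_floordiv_iff_mul_le (by omega)]; omega
    omega

-- A's 'for i in range(n, num): if x + i == num: return True' / 'return False'
def loopA (num : Int) : List Int → Bool
  | [] => false
  | i :: rest => if revA i 0 + i == num then true else loopA num rest

def sumOfNumberAndReverse (num : Int) : Bool :=
  if num == 0 then true
  else loopA num (PySem.List.pyRange (PySem.Int.floordiv num 2) num 1)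

-- ===== PORT B =====
-- Source B's digit-count loop: d = 0; t = num; while t > 0: d += 1; t //= 10
def countD (t d : Int) : Int :=
  if h : 0 < t then countD (PySem.Int.floordiv t 10) (d + 1) else d
  termination_by t.toNat
  decreasing_by
    have h1 : PySem.Int.floordiv t 10 < t := by
      rw [PySem.Int.floordiv_lt_iff_lt_mul (by omega)]; omega
    have h2 : (0 : Int) ≤ PySem.Int.floordiv t 10 := by
      rw [PySem.Int.le_floordiv_iff_mul_le (by omega)]; omega
    omega

-- Source B's 'search'.  Python's '10 ** h' / 'weights[j]' are ported as '10 ^ h.toNat'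
-- (the exponents h and L-1-j are ≥ 0 at every call) and 'PySem.List.pyGetD … 0'
-- (the index j satisfies 0 ≤ j < len(weights) at every call, so no IndexError).
def searchB (j h L rem : Int) (weights : List Int) : Bool :=
  if rem < 0 then false
  else if h ≤ j then
    if PySem.Int.mod L 2 == 1 then
      let p : Int := 10 ^ h.toNat
      let q := PySem.Int.floordiv rem p
      PySem.Int.mod rem p == 0 && PySem.Int.mod q 2 == 0 && decide (q ≤ 18) &&
        (decide (1 < L) || decide (0 < q))
    else rem == 0
  else
    (PySem.List.pyRange (if j == 0 then 1 else 0) 19 1).any fun s =>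
      searchB (j + 1) h L (rem - s * PySem.List.pyGetD weights j 0) weights
  termination_by (h - j).toNat
  decreasing_by omega

-- Source B's weights comprehension '[10 ** j + 10 ** (L - 1 - j) for j in range(h)]'
-- (the exponents j and L-1-j are ≥ 0 whenever the list is consulted)
def wlist (L h : Int) : List Int :=
  (PySem.List.pyRange 0 h 1).map fun j => (10 : Int) ^ j.toNat + 10 ^ (L - 1 - j).toNat

def sumOfNumberAndReverse_alt (num : Int) : Bool :=
  if num ≤ 0 then num == 0
  else
    let d := countD num 0
    (PySem.List.pyRange 1 (d + 1) 1).any fun L =>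
      let h := PySem.Int.floordiv L 2
      let weights := wlist L h
      searchB 0 h L num weights

-- ===== PRECONDITION & SPEC =====
def Spec_sumOfNumberAndReverse (num : Int) (out : Bool) : Prop := out = sumOfNumberAndReverse_alt num
instance (num : Int) (out : Bool) : Decidable (Spec_sumOfNumberAndReverse num out) := by unfold Spec_sumOfNumberAndReverse; infer_instance

-- ===== CLAIM (what is proved, stated in full; the proofs are below) =====
def Claim_equal_sumOfNumberAndReverse : Prop := ∀ (num : Int), Dom_sumOfNumberAndReverse num → Spec_sumOfNumberAndReverse num (sumOfNumberAndReverse num)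

-- ===== LEMMAS AND PROOFS =====

-- digit reverse of n, as a number
def Rn (n : ℕ) : ℕ := Nat.ofDigits 10 ((Nat.digits 10 n).reverse)

-- i + rev(i) for a digit string
def FV (a : List ℕ) : ℤ := ((Nat.ofDigits 10 a : ℕ) : ℤ) + ((Nat.ofDigits 10 a.reverse : ℕ) : ℤ)

-- Σ_j t_j * (10^j + 10^(L-1-j)): the weighted sum of the half digit-sum sequence
def wsum : ℕ → List ℕ → ℤ
  | _, [] => 0
  | L, x :: t => (x : ℤ) * (1 + 10 ^ (L - 1)) + 10 * wsum (L - 2) t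

-- digit string of length 2*t.length+e realizing half-sums t and middle digit-sum q
def buildA : List ℕ → ℕ → ℕ → List ℕ
  | [], e, q => if e = 1 then [q / 2] else []
  | x :: t, e, q => (x - min x 9) :: (buildA t e q ++ [min x 9])

-- middle/base condition of the search at length L
def MidOK (L : ℕ) (rem : ℤ) : Prop :=
  if L % 2 = 1 then ∃ q : ℕ, rem = (q : ℤ) * 10 ^ (L / 2) ∧ q % 2 = 0 ∧ q ≤ 18 ∧ (1 < L ∨ 0 < q)
  else rem = 0

theorem revA_digits (n : ℕ) : ∀ r : ℤ,
    revA (n : ℤ) r = ((Nat.digits 10 n).map (fun d : ℕ => (d : ℤ))).foldl (fun r d => r * 10 + d) r := by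
  induction n using Nat.strong_induction_on with
  | _ n IH =>
    intro r
    rcases Nat.eq_zero_or_pos n with h | h
    · subst h; rw [revA]; simp
    · rw [revA]
      have hpos : (0 : ℤ) < (n : ℤ) := by exact_mod_cast h
      rw [dif_pos hpos]
      have hf : PySem.Int.floordiv (n : ℤ) 10 = ((n / 10 : ℕ) : ℤ) := by
        exact_mod_cast PySem.Int.floordiv_natCast n 10
      have hm : PySem.Int.mod (n : ℤ) 10 = ((n % 10 : ℕ) : ℤ) := by
        exact_mod_cast PySem.Int.mod_natCast n 10
      rw [hf, hm, IH (n / 10) (Nat.div_lt_self h (by norm_num))]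
      rw [Nat.digits_def' (by norm_num : (1 : ℕ) < 10) h]
      simp

theorem foldl_msb (l : List ℕ) : ∀ r : ℤ,
    (l.map (fun d : ℕ => (d : ℤ))).foldl (fun r d => r * 10 + d) r
      = r * 10 ^ l.length + ((Nat.ofDigits 10 l.reverse : ℕ) : ℤ) := by
  induction l with
  | nil => intro r; simp [Nat.ofDigits]
  | cons d l ih =>
    intro r
    rw [List.map_cons, List.foldl_cons, ih (r * 10 + (d : ℤ)), List.reverse_cons,
      Nat.ofDigits_append, Nat.ofDigits_singleton, List.length_reverse, List.length_cons]
    push_cast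
    ring

theorem revA_eq_Rn (n : ℕ) : revA (n : ℤ) 0 = (Rn n : ℤ) := by
  rw [revA_digits, foldl_msb, Rn]
  ring

theorem loopA_eq_any (num : Int) (xs : List Int) :
    loopA num xs = xs.any (fun i => revA i 0 + i == num) := by
  induction xs with
  | nil => rfl
  | cons i rest ih =>
      rw [loopA]
      by_cases h : revA i 0 + i = num <;> simp [h, ih]

theorem A_iff (N : ℕ) (h0 : 0 < N) :
    sumOfNumberAndReverse (N : ℤ) = true ↔ ∃ i : ℕ, N / 2 ≤ i ∧ i < N ∧ i + Rn i = N := by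
  have h2 : PySem.Int.floordiv (N : ℤ) 2 = ((N / 2 : ℕ) : ℤ) := by
    exact_mod_cast PySem.Int.floordiv_natCast N 2
  rw [sumOfNumberAndReverse, if_neg (by simp; omega), loopA_eq_any, List.any_eq_true]
  constructor
  · rintro ⟨i, hmem, hi⟩
    rw [h2, PySem.List.mem_pyRange_one] at hmem
    have hi0 : 0 ≤ i := le_trans (by positivity) hmem.1
    have hcast : i = ((i.toNat : ℕ) : ℤ) := (Int.toNat_of_nonneg hi0).symm
    rw [hcast, revA_eq_Rn, beq_iff_eq] at hi
    refine ⟨i.toNat, ?_, ?_, ?_⟩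
    · have := hmem.1; omega
    · have := hmem.2; omega
    · omega
  · rintro ⟨i, hle, hlt, heq⟩
    refine ⟨(i : ℤ), ?_, ?_⟩
    · rw [h2, PySem.List.mem_pyRange_one]
      constructor
      · exact_mod_cast hle
      · exact_mod_cast hlt
    · rw [revA_eq_Rn, beq_iff_eq]
      omega

theorem Rn_pos (i : ℕ) (h : 1 ≤ i) : 1 ≤ Rn i := by
  have hne : Nat.digits 10 i ≠ [] := Nat.digits_ne_nil_iff_ne_zero.mpr (by omega)
  have hr : (Nat.digits 10 i).reverse ≠ [] := by simpa using hne
  obtain ⟨hd, tl, he⟩ := List.exists_cons_of_ne_nil hr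
  have hhd : hd ≠ 0 := by
    have : (Nat.digits 10 i).reverse.head hr ≠ 0 := by
      rw [List.head_reverse]
      exact Nat.getLast_digit_ne_zero 10 (by omega)
    simpa [he] using this
  rw [Rn, he, Nat.ofDigits_cons]
  omega

theorem Rn_lt_of_dvd (i : ℕ) (h1 : 1 ≤ i) (h10 : 10 ∣ i) : Rn i < i := by
  have hge : 10 ≤ i := Nat.le_of_dvd (by omega) h10
  have hq : 1 ≤ i / 10 := (Nat.le_div_iff_mul_le (by norm_num)).mpr (by omega)
  have hmod : i % 10 = 0 := by omega
  have hdig : Nat.digits 10 i = 0 :: Nat.digits 10 (i / 10) := by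
    rw [Nat.digits_def' (by norm_num : (1 : ℕ) < 10) (by omega), hmod]
  have hRn : Rn i = Rn (i / 10) := by
    rw [Rn, hdig, List.reverse_cons, Nat.ofDigits_append, Nat.ofDigits_singleton, Rn]
    ring
  have hlt : Rn (i / 10) < 10 ^ (Nat.digits 10 (i / 10)).length := by
    have := Nat.ofDigits_lt_base_pow_length (b := 10) (l := (Nat.digits 10 (i / 10)).reverse)
      (by norm_num) (fun x hx => Nat.digits_lt_base (by norm_num) (List.mem_reverse.mp hx))
    rw [List.length_reverse] at this
    exact this
  have hle : 10 ^ (Nat.digits 10 (i / 10)).length ≤ 10 * (i / 10) :=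
    Nat.base_pow_length_digits_le 10 (i / 10) (by norm_num) (by omega)
  omega

theorem Rn_invol (i : ℕ) (h1 : 1 ≤ i) (h10 : ¬ 10 ∣ i) : Rn (Rn i) = i := by
  have hne : Nat.digits 10 i ≠ [] := Nat.digits_ne_nil_iff_ne_zero.mpr (by omega)
  have hdig : Nat.digits 10 (Rn i) = (Nat.digits 10 i).reverse := by
    refine Nat.digits_ofDigits 10 (by norm_num) _
      (fun x hx => Nat.digits_lt_base (by norm_num) (List.mem_reverse.mp hx)) ?_
    intro hr
    rw [List.getLast_reverse]
    have hd : Nat.digits 10 i = i % 10 :: Nat.digits 10 (i / 10) :=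
      Nat.digits_def' (by norm_num : (1 : ℕ) < 10) (by omega)
    have hm : i % 10 ≠ 0 := by omega
    simp [hd]
    exact hm
  rw [Rn, hdig, List.reverse_reverse, Nat.ofDigits_digits]

theorem good_iff (N : ℕ) (h0 : 0 < N) :
    (∃ i : ℕ, N / 2 ≤ i ∧ i < N ∧ i + Rn i = N) ↔ (∃ i : ℕ, 1 ≤ i ∧ i + Rn i = N) := by
  constructor
  · rintro ⟨i, h1, h2, h3⟩
    refine ⟨i, ?_, h3⟩
    rcases Nat.eq_zero_or_pos i with rfl | hp
    · simp [Rn] at h3; omega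
    · omega
  · rintro ⟨i, h1, h2⟩
    have hRp : 1 ≤ Rn i := Rn_pos i h1
    by_cases hhalf : N / 2 ≤ i
    · exact ⟨i, hhalf, by omega, h2⟩
    · push_neg at hhalf
      have hnd : ¬ 10 ∣ i := by
        intro hdvd
        have := Rn_lt_of_dvd i h1 hdvd
        omega
      refine ⟨Rn i, by omega, by omega, ?_⟩
      rw [Rn_invol i h1 hnd]
      omega

theorem countD_eq (n : ℕ) : ∀ acc : ℤ, countD (n : ℤ) acc = acc + (Nat.digits 10 n).length := by
  induction n using Nat.strong_induction_on with
  | _ n IH =>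
    intro acc
    rcases Nat.eq_zero_or_pos n with h | h
    · subst h; rw [countD]; simp
    · rw [countD]
      have hpos : (0 : ℤ) < (n : ℤ) := by exact_mod_cast h
      rw [dif_pos hpos]
      have hf : PySem.Int.floordiv (n : ℤ) 10 = ((n / 10 : ℕ) : ℤ) := by
        exact_mod_cast PySem.Int.floordiv_natCast n 10
      rw [hf, IH (n / 10) (Nat.div_lt_self h (by norm_num))]
      rw [Nat.digits_def' (by norm_num : (1 : ℕ) < 10) h]
      simp only [List.length_cons]
      push_cast
      omega

theorem pair_step (x y : ℕ) (m : List ℕ) :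
    FV (x :: (m ++ [y])) = ((x : ℤ) + y) * (1 + 10 ^ (m.length + 1)) + 10 * FV m := by
  have h1 : (x :: (m ++ [y])).reverse = y :: (m.reverse ++ [x]) := by simp
  rw [FV, FV, h1, Nat.ofDigits_cons, Nat.ofDigits_cons, Nat.ofDigits_append, Nat.ofDigits_append,
    Nat.ofDigits_singleton, Nat.ofDigits_singleton, List.length_reverse]
  push_cast
  ring

theorem buildA_len (t : List ℕ) (e q : ℕ) (he : e ≤ 1) :
    (buildA t e q).length = 2 * t.length + e := by
  induction t with
  | nil => interval_cases e <;> simp [buildA]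
  | cons x t ih =>
    have hstep : buildA (x :: t) e q = (x - min x 9) :: (buildA t e q ++ [min x 9]) := rfl
    rw [hstep]
    simp only [List.length_cons, List.length_append, ih]
    simp
    omega

theorem buildA_lt (t : List ℕ) (e q : ℕ) (ht : ∀ x ∈ t, x ≤ 18) (hq : q ≤ 18) :
    ∀ d ∈ buildA t e q, d < 10 := by
  induction t with
  | nil =>
    intro d hd
    by_cases he : e = 1
    · subst he
      have hb : buildA [] 1 q = [q / 2] := rfl
      rw [hb] at hd
      have : d = q / 2 := by simpa using hd
      omega
    · have hb : buildA [] e q = [] := by simp [buildA, he]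
      rw [hb] at hd
      simp at hd
  | cons x t ih =>
    intro d hd
    have hx : x ≤ 18 := ht x (by simp)
    have hstep : buildA (x :: t) e q = (x - min x 9) :: (buildA t e q ++ [min x 9]) := rfl
    rw [hstep] at hd
    rcases List.mem_cons.mp hd with rfl | hd
    · omega
    rcases List.mem_append.mp hd with hd | hd
    · exact ih (fun z hz => ht z (List.mem_cons_of_mem _ hz)) d hd
    · have : d = min x 9 := by simpa using hd
      omega

theorem buildA_FV (t : List ℕ) (e q : ℕ) (he : e ≤ 1) (he0 : e = 0 → q = 0) (hq2 : q % 2 = 0) :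
    FV (buildA t e q) = wsum (2 * t.length + e) t + (q : ℤ) * 10 ^ t.length := by
  induction t with
  | nil =>
    interval_cases e
    · have hq0 : q = 0 := he0 rfl
      subst hq0
      simp [buildA, FV, wsum, Nat.ofDigits]
    · have hb : buildA [] 1 q = [q / 2] := rfl
      rw [hb]
      have hfv : FV [q / 2] = ((q / 2 : ℕ) : ℤ) + ((q / 2 : ℕ) : ℤ) := by
        simp [FV, Nat.ofDigits_singleton]
      rw [hfv]
      simp only [List.length_nil, wsum]
      push_cast
      omega
  | cons x t ih =>
    have hstep : buildA (x :: t) e q = (x - min x 9) :: (buildA t e q ++ [min x 9]) := rfl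
    rw [hstep, pair_step, buildA_len t e q he, ih]
    rw [wsum]
    simp only [List.length_cons]
    have h1 : 2 * (t.length + 1) + e - 1 = 2 * t.length + e + 1 := by omega
    have h2 : 2 * (t.length + 1) + e - 2 = 2 * t.length + e := by omega
    rw [h1, h2]
    have hx : ((x - min x 9 : ℕ) : ℤ) + ((min x 9 : ℕ) : ℤ) = (x : ℤ) := by omega
    rw [hx]
    push_cast
    ring

theorem buildA_last (t : List ℕ) (e q : ℕ) (hq2 : q % 2 = 0)
    (hhead : (match t with | [] => 1 ≤ q ∧ e = 1 | x :: _ => 1 ≤ x)) :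
    ∀ hne : buildA t e q ≠ [], (buildA t e q).getLast hne ≠ 0 := by
  cases t with
  | nil =>
    have hq : 1 ≤ q := hhead.1
    have he : e = 1 := hhead.2
    subst he
    intro hne
    have hb : buildA [] 1 q = [q / 2] := rfl
    have hl : (buildA [] 1 q).getLast hne = q / 2 :=
      (List.getLast_congr _ (by simp) hb).trans (by simp)
    rw [hl]
    omega
  | cons x t =>
    intro hne
    have hx : 1 ≤ x := hhead
    have hstep : buildA (x :: t) e q = (x - min x 9) :: buildA t e q ++ [min x 9] := rfl
    have hl : (buildA (x :: t) e q).getLast hne = min x 9 :=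
      (List.getLast_congr _ (by simp) hstep).trans
        (List.getLast_append_singleton _)
    rw [hl]
    omega

theorem destructA (a : List ℕ) (hd : ∀ d ∈ a, d < 10) :
    ∃ (t : List ℕ) (q : ℕ), t.length = a.length / 2 ∧ (∀ x ∈ t, x ≤ 18) ∧ q ≤ 18 ∧ q % 2 = 0 ∧
      (a.length % 2 = 0 → q = 0) ∧
      FV a = wsum a.length t + (q : ℤ) * 10 ^ (a.length / 2) ∧
      (∀ hne : a ≠ [], a.getLast hne ≠ 0 →
        (match t with | [] => 1 ≤ q | x :: _ => 1 ≤ x)) := by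
  suffices H : ∀ (n : ℕ) (a : List ℕ), a.length = n → (∀ d ∈ a, d < 10) →
      ∃ (t : List ℕ) (q : ℕ), t.length = a.length / 2 ∧ (∀ x ∈ t, x ≤ 18) ∧ q ≤ 18 ∧ q % 2 = 0 ∧
        (a.length % 2 = 0 → q = 0) ∧
        FV a = wsum a.length t + (q : ℤ) * 10 ^ (a.length / 2) ∧
        (∀ hne : a ≠ [], a.getLast hne ≠ 0 →
          (match t with | [] => 1 ≤ q | x :: _ => 1 ≤ x)) by
    exact H a.length a rfl hd
  clear hd a
  intro n
  induction n using Nat.strong_induction_on with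
  | _ n IH =>
    intro a hlen hdig
    rcases a with _ | ⟨c, rest⟩
    · refine ⟨[], 0, by simp, by simp, by omega, by omega, fun _ => rfl, ?_, fun hne => absurd rfl hne⟩
      simp [FV, wsum, Nat.ofDigits]
    rcases rest with _ | ⟨r, rest⟩
    · have hz : c < 10 := hdig c (by simp)
      refine ⟨[], 2 * c, by simp, by simp, by omega, by omega, by simp, ?_, ?_⟩
      · have hfv : FV [c] = ((c : ℕ) : ℤ) + ((c : ℕ) : ℤ) := by
          simp [FV, Nat.ofDigits_singleton]
        rw [hfv]
        simp only [List.length_singleton, wsum]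
        push_cast
        ring
      · intro hne hz0
        simp only [List.getLast_singleton] at hz0
        omega
    · have hrne : (r :: rest : List ℕ) ≠ [] := by simp
      have hsplit : (r :: rest : List ℕ) = (r :: rest).dropLast ++ [(r :: rest).getLast hrne] :=
        (List.dropLast_append_getLast hrne).symm
      set m := (r :: rest).dropLast with hm
      set b := (r :: rest).getLast hrne with hb
      have hbd : b < 10 := hdig b (by rw [hb]; exact List.mem_cons_of_mem _ (List.getLast_mem hrne))
      have hcd : c < 10 := hdig c (by simp)
      have hmlen : m.length = n - 2 := by
        have := congrArg List.length hsplit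
        simp at this
        simp only [List.length_cons] at hlen
        omega
      have hmlt : m.length < n := by
        simp only [List.length_cons] at hlen
        omega
      obtain ⟨t', q, hlen', hbnd', hq18, hq2, hpar', hFV', hlast'⟩ :=
        IH m.length hmlt m rfl (fun d hd => hdig d (by
          rw [show (c :: r :: rest : List ℕ) = c :: (m ++ [b]) from by rw [← hsplit]]
          exact List.mem_cons_of_mem _ (List.mem_append_left _ hd)))
      have haeq : (c :: r :: rest : List ℕ) = c :: (m ++ [b]) := by rw [← hsplit]
      have hL : (c :: r :: rest : List ℕ).length = m.length + 2 := by
        rw [haeq]; simp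
      refine ⟨(c + b) :: t', q, ?_, ?_, hq18, hq2, ?_, ?_, ?_⟩
      · simp only [List.length_cons, hL, hlen']
        omega
      · intro x hx
        rcases List.mem_cons.mp hx with rfl | hx
        · omega
        · exact hbnd' x hx
      · intro hpar
        exact hpar' (by omega)
      · rw [haeq, pair_step, hFV']
        have hL2 : (c :: (m ++ [b])).length = m.length + 2 := by simp
        rw [hL2, wsum]
        have h1 : m.length + 2 - 1 = m.length + 1 := by omega
        have h2 : m.length + 2 - 2 = m.length := by omega
        have h3 : (m.length + 2) / 2 = m.length / 2 + 1 := by omega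
        rw [h1, h2, h3]
        push_cast
        ring
      · intro hne hlast0
        have hgl : (c :: r :: rest : List ℕ).getLast hne = b :=
          (List.getLast_congr _ (by simp) haeq).trans (List.getLast_append_singleton (c :: m))
        rw [hgl] at hlast0
        show 1 ≤ c + b
        omega

theorem wsum_nonneg : ∀ (L : ℕ) (t : List ℕ), 0 ≤ wsum L t := by
  intro L t
  induction t generalizing L with
  | nil => simp [wsum]
  | cons x t ih =>
    rw [wsum]
    have h1 : (0 : ℤ) ≤ (x : ℤ) * (1 + 10 ^ (L - 1)) := by positivity
    have h2 := ih (L - 2)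
    linarith

theorem MidOK_nonneg (L : ℕ) (rem : ℤ) (h : MidOK L rem) : 0 ≤ rem := by
  rw [MidOK] at h
  split_ifs at h
  · obtain ⟨q, rfl, -⟩ := h
    positivity
  · omega

theorem searchB_base (L : ℕ) (rem : ℤ) (w : List Int) (hL : 1 ≤ L) :
    searchB (L / 2 : ℕ) (L / 2 : ℕ) (L : ℕ) rem w = true ↔ MidOK L rem := by
  rw [searchB]
  by_cases hneg : rem < 0
  · rw [if_pos hneg]
    constructor
    · intro h
      exact absurd h (by simp)
    · intro h
      exact absurd (MidOK_nonneg L rem h) (by omega)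
  · rw [if_neg hneg, if_pos (le_refl _)]
    have hP : (0 : ℤ) < 10 ^ (L / 2) := by positivity
    have htn : (((L / 2 : ℕ) : ℤ)).toNat = L / 2 := Int.toNat_natCast _
    have hm2 : PySem.Int.mod ((L : ℕ) : ℤ) 2 = ((L % 2 : ℕ) : ℤ) := by
      exact_mod_cast PySem.Int.mod_natCast L 2
    by_cases hodd : L % 2 = 1
    · rw [MidOK, if_pos hodd]
      rw [if_pos (by rw [hm2, hodd]; rfl)]
      show (PySem.Int.mod rem (10 ^ (((L / 2 : ℕ) : ℤ)).toNat) == 0 &&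
            PySem.Int.mod (PySem.Int.floordiv rem (10 ^ (((L / 2 : ℕ) : ℤ)).toNat)) 2 == 0 &&
            decide (PySem.Int.floordiv rem (10 ^ (((L / 2 : ℕ) : ℤ)).toNat) ≤ 18) &&
            (decide (1 < ((L : ℕ) : ℤ)) || decide (0 < PySem.Int.floordiv rem (10 ^ (((L / 2 : ℕ) : ℤ)).toNat)))) = true ↔ _
      rw [htn]
      rw [PySem.Int.floordiv_eq_ediv_of_pos hP, PySem.Int.mod_eq_emod_of_pos hP,
        PySem.Int.mod_eq_emod_of_pos (show (0 : ℤ) < 2 by norm_num)]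
      simp only [Bool.and_eq_true, Bool.or_eq_true, decide_eq_true_eq, beq_iff_eq]
      have hdm := Int.ediv_add_emod rem (10 ^ (L / 2))
      constructor
      · rintro ⟨⟨⟨h1, h2⟩, h3⟩, h4⟩
        have hQ0 : 0 ≤ rem / 10 ^ (L / 2) := Int.ediv_nonneg (by omega) (le_of_lt hP)
        refine ⟨(rem / 10 ^ (L / 2)).toNat, ?_, by omega, by omega, ?_⟩
        · rw [Int.toNat_of_nonneg hQ0, mul_comm]
          rw [h1, add_zero] at hdm
          exact hdm.symm
        · rcases h4 with h4 | h4
          · left; exact_mod_cast h4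
          · right; omega
      · rintro ⟨q, hq, hq2, hq18, hq1⟩
        have hdiv : rem / 10 ^ (L / 2) = (q : ℤ) := by
          rw [hq]
          exact Int.mul_ediv_cancel _ (ne_of_gt hP)
        have hmod : rem % 10 ^ (L / 2) = 0 := by
          rw [hq]
          exact Int.mul_emod_left ..
        refine ⟨⟨⟨hmod, by omega⟩, by omega⟩, ?_⟩
        rcases hq1 with h | h
        · left; exact_mod_cast h
        · right; omega
    · rw [MidOK, if_neg hodd]
      have heven : L % 2 = 0 := by omega
      rw [if_neg (by rw [hm2, heven]; simp)]
      simp [beq_iff_eq]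

theorem wsum_shift (L j x : ℕ) (t' : List ℕ) (h : 2 * j + 2 ≤ L) :
    (10 : ℤ) ^ j * wsum (L - 2 * j) (x :: t')
      = (x : ℤ) * (10 ^ j + 10 ^ (L - 1 - j)) + 10 ^ (j + 1) * wsum (L - 2 * (j + 1)) t' := by
  rw [wsum]
  have e2 : L - 2 * j - 2 = L - 2 * (j + 1) := by omega
  have e3 : (10 : ℤ) ^ j * 10 ^ (L - 2 * j - 1) = 10 ^ (L - 1 - j) := by
    rw [← pow_add]
    congr 1
    omega
  rw [e2]
  calc (10 : ℤ) ^ j * ((x : ℤ) * (1 + 10 ^ (L - 2 * j - 1)) + 10 * wsum (L - 2 * (j + 1)) t')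
      = (x : ℤ) * (10 ^ j + 10 ^ j * 10 ^ (L - 2 * j - 1)) + (10 ^ j * 10) * wsum (L - 2 * (j + 1)) t' := by
        ring
    _ = _ := by rw [e3, ← pow_succ]

theorem wlist_get (L : ℕ) (j : ℕ) (hjlt : j < L / 2) :
    PySem.List.pyGetD (wlist L ((L / 2 : ℕ) : ℤ)) (j : ℤ) 0
      = (10 : ℤ) ^ j + 10 ^ (L - 1 - j) := by
  rw [wlist]
  rw [PySem.List.pyGetD_map_pyRange_of_nonneg _ _ _ _ (by positivity) (by exact_mod_cast hjlt)]
  have e1 : ((j : ℤ)).toNat = j := Int.toNat_natCast j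
  have e2 : ((L : ℤ) - 1 - (j : ℤ)).toNat = L - 1 - j := by omega
  rw [e1, e2]

theorem searchB_iff (L : ℕ) (hL : 1 ≤ L) : ∀ (j : ℕ) (rem : ℤ), 1 ≤ j → j ≤ L / 2 →
    (searchB (j : ℕ) (L / 2 : ℕ) (L : ℕ) rem (wlist L (L / 2 : ℕ)) = true ↔
      ∃ t : List ℕ, t.length = L / 2 - j ∧ (∀ x ∈ t, x ≤ 18) ∧
        MidOK L (rem - 10 ^ j * wsum (L - 2 * j) t)) := by
  suffices H : ∀ (k : ℕ) (j : ℕ) (rem : ℤ), 1 ≤ j → j ≤ L / 2 → L / 2 - j = k →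
      (searchB (j : ℕ) (L / 2 : ℕ) (L : ℕ) rem (wlist L (L / 2 : ℕ)) = true ↔
        ∃ t : List ℕ, t.length = L / 2 - j ∧ (∀ x ∈ t, x ≤ 18) ∧
          MidOK L (rem - 10 ^ j * wsum (L - 2 * j) t)) by
    exact fun j rem h1 h2 => H (L / 2 - j) j rem h1 h2 rfl
  intro k
  induction k with
  | zero =>
    intro j rem h1 h2 hk
    have hj : j = L / 2 := by omega
    subst hj
    rw [searchB_base L rem _ hL]
    constructor
    · intro h
      exact ⟨[], by simp, by simp, by simpa [wsum] using h⟩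
    · rintro ⟨t, ht0, -, hmid⟩
      have ht : t = [] := List.eq_nil_of_length_eq_zero (by omega)
      subst ht
      simpa [wsum] using hmid
  | succ k ih =>
    intro j rem h1 h2 hk
    have hjlt : j < L / 2 := by omega
    have h2L : 2 * j + 2 ≤ L := by omega
    rw [searchB]
    by_cases hneg : rem < 0
    · rw [if_pos hneg]
      constructor
      · intro h
        exact absurd h (by simp)
      · rintro ⟨t, -, -, hmid⟩
        have h0 := MidOK_nonneg _ _ hmid
        have hw := wsum_nonneg (L - 2 * j) t
        have hp : (0 : ℤ) < 10 ^ j := by positivity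
        nlinarith
    · rw [if_neg hneg, if_neg (by push_cast; omega), if_neg (by simp; omega)]
      rw [List.any_eq_true]
      constructor
      · rintro ⟨s, hs, hsb⟩
        rw [PySem.List.mem_pyRange_one] at hs
        rw [wlist_get L j hjlt] at hsb
        rw [show ((j : ℤ) + 1) = ((j + 1 : ℕ) : ℤ) from by push_cast; ring] at hsb
        rw [ih (j + 1) _ (by omega) (by omega) (by omega)] at hsb
        obtain ⟨t', hlen', hbnd', hmid'⟩ := hsb
        refine ⟨s.toNat :: t', by simp [hlen']; omega, ?_, ?_⟩
        · intro x hx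
          rcases List.mem_cons.mp hx with rfl | hx
          · omega
          · exact hbnd' x hx
        · have harith : rem - 10 ^ j * wsum (L - 2 * j) (s.toNat :: t')
              = rem - s * (10 ^ j + 10 ^ (L - 1 - j)) - 10 ^ (j + 1) * wsum (L - 2 * (j + 1)) t' := by
            rw [wsum_shift L j s.toNat t' h2L]
            rw [show ((s.toNat : ℕ) : ℤ) = s from by omega]
            ring
          rw [harith]
          exact hmid'
      · rintro ⟨t, hlen, hbnd, hmid⟩
        rcases t with _ | ⟨x, t'⟩
        · simp at hlen
          omega
        refine ⟨(x : ℤ), ?_, ?_⟩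
        · rw [PySem.List.mem_pyRange_one]
          have := hbnd x (by simp)
          omega
        · rw [wlist_get L j hjlt]
          rw [show ((j : ℤ) + 1) = ((j + 1 : ℕ) : ℤ) from by push_cast; ring]
          rw [ih (j + 1) _ (by omega) (by omega) (by omega)]
          refine ⟨t', by simp at hlen; omega, fun z hz => hbnd z (List.mem_cons_of_mem _ hz), ?_⟩
          have harith : rem - 10 ^ j * wsum (L - 2 * j) (x :: t')
              = rem - (x : ℤ) * (10 ^ j + 10 ^ (L - 1 - j)) - 10 ^ (j + 1) * wsum (L - 2 * (j + 1)) t' := by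
            rw [wsum_shift L j x t' h2L]
            ring
          rw [← harith]
          exact hmid

def PalEx (N L : ℕ) : Prop :=
  ∃ (t : List ℕ) (q : ℕ), t.length = L / 2 ∧ (∀ x ∈ t, x ≤ 18) ∧ q ≤ 18 ∧ q % 2 = 0 ∧
    (L % 2 = 0 → q = 0) ∧ (N : ℤ) = wsum L t + (q : ℤ) * 10 ^ (L / 2) ∧
    (match t with | [] => 1 ≤ q | x :: _ => 1 ≤ x)

theorem FV_digits (i : ℕ) : FV (Nat.digits 10 i) = (i : ℤ) + (Rn i : ℤ) := by
  rw [FV, Nat.ofDigits_digits, Rn]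

theorem atL_palex (N L : ℕ) (hN : 0 < N) (hL : 1 ≤ L) :
    searchB 0 (L / 2 : ℕ) (L : ℕ) (N : ℤ) (wlist L (L / 2 : ℕ)) = true ↔ PalEx N L := by
  by_cases hL2 : L / 2 = 0
  · have hL1 : L = 1 := by omega
    subst hL1
    have h12 : (1 : ℕ) / 2 = 0 := rfl
    have hb := searchB_base 1 (N : ℤ) (wlist 1 0) (by norm_num)
    simp only [h12, Nat.cast_zero, Nat.cast_one] at hb ⊢
    rw [hb, MidOK, if_pos (by norm_num)]
    constructor
    · rintro ⟨q, hq, hq2, hq18, hq1⟩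
      refine ⟨[], q, by norm_num, by simp, hq18, hq2, by omega, ?_, ?_⟩
      · simpa [wsum] using hq
      · rcases hq1 with h | h
        · omega
        · omega
    · rintro ⟨t, q, htl, -, hq18, hq2, -, heq, hhd⟩
      have ht : t = [] := List.eq_nil_of_length_eq_zero (by omega)
      subst ht
      refine ⟨q, by simpa [wsum] using heq, hq2, hq18, Or.inr ?_⟩
      omega
  · have hh1 : 1 ≤ L / 2 := by omega
    have hL2' : 2 ≤ L := by omega
    rw [searchB]
    rw [if_neg (by omega), if_neg (by push_cast; omega)]
    rw [show (if ((0 : ℤ) == 0) = true then (1 : ℤ) else 0) = 1 from rfl]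
    rw [List.any_eq_true]
    have hw0 : PySem.List.pyGetD (wlist L ((L / 2 : ℕ) : ℤ)) (0 : ℤ) 0
        = (10 : ℤ) ^ 0 + 10 ^ (L - 1 - 0) := by
      have h := wlist_get L 0 (by omega)
      rwa [show ((0 : ℕ) : ℤ) = (0 : ℤ) from rfl] at h
    constructor
    · rintro ⟨s, hs, hsb⟩
      rw [PySem.List.mem_pyRange_one] at hs
      rw [show (0 : ℤ) + 1 = ((1 : ℕ) : ℤ) from by norm_num] at hsb
      rw [show (s * PySem.List.pyGetD (wlist L ((L / 2 : ℕ) : ℤ)) 0 0)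
            = s * ((10 : ℤ) ^ 0 + 10 ^ (L - 1 - 0)) from by rw [← hw0]] at hsb
      rw [searchB_iff L hL 1 _ le_rfl hh1] at hsb
      obtain ⟨t', hlen', hbnd', hmid'⟩ := hsb
      have harith : (N : ℤ) - s * ((10 : ℤ) ^ 0 + 10 ^ (L - 1 - 0)) - 10 ^ 1 * wsum (L - 2 * 1) t'
          = (N : ℤ) - wsum L (s.toNat :: t') := by
        rw [wsum, show ((s.toNat : ℕ) : ℤ) = s from by omega,
          show L - 2 * 1 = L - 2 from by norm_num, show L - 1 - 0 = L - 1 from rfl]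
        ring
      rw [harith] at hmid'
      rw [MidOK] at hmid'
      split_ifs at hmid' with hodd
      · obtain ⟨q, hq, hq2, hq18, -⟩ := hmid'
        refine ⟨s.toNat :: t', q, by simp [hlen']; omega, ?_, hq18, hq2, by omega, by linarith [hq], by omega⟩
        intro x hx
        rcases List.mem_cons.mp hx with rfl | hx
        · omega
        · exact hbnd' x hx
      · refine ⟨s.toNat :: t', 0, by simp [hlen']; omega, ?_, by omega, by omega, fun _ => rfl, by push_cast; linarith [hmid'], by omega⟩
        intro x hx
        rcases List.mem_cons.mp hx with rfl | hx
        · omega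
        · exact hbnd' x hx
    · rintro ⟨t, q, htl, hbnd, hq18, hq2, hpar, heq, hhd⟩
      rcases t with _ | ⟨x, t'⟩
      · simp at htl
        omega
      have hx1 : 1 ≤ x := hhd
      have hx18 : x ≤ 18 := hbnd x (by simp)
      refine ⟨(x : ℤ), by rw [PySem.List.mem_pyRange_one]; omega, ?_⟩
      rw [show (0 : ℤ) + 1 = ((1 : ℕ) : ℤ) from by norm_num]
      rw [show (((x : ℕ) : ℤ) * PySem.List.pyGetD (wlist L ((L / 2 : ℕ) : ℤ)) 0 0)
            = ((x : ℕ) : ℤ) * ((10 : ℤ) ^ 0 + 10 ^ (L - 1 - 0)) from by rw [← hw0]]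
      rw [searchB_iff L hL 1 _ le_rfl hh1]
      refine ⟨t', by simp at htl; omega, fun z hz => hbnd z (List.mem_cons_of_mem _ hz), ?_⟩
      have harith : (N : ℤ) - (x : ℤ) * ((10 : ℤ) ^ 0 + 10 ^ (L - 1 - 0)) - 10 ^ 1 * wsum (L - 2 * 1) t'
          = (N : ℤ) - wsum L (x :: t') := by
        rw [wsum, show L - 2 * 1 = L - 2 from by norm_num, show L - 1 - 0 = L - 1 from rfl]
        ring
      rw [harith, MidOK]
      split_ifs with hodd
      · exact ⟨q, by linarith [heq], hq2, hq18, Or.inl (by omega)⟩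
      · have hq0 : q = 0 := hpar (by omega)
        subst hq0
        push_cast at heq
        linarith [heq]

theorem palex_iff (N L : ℕ) (hL : 1 ≤ L) :
    PalEx N L ↔ ∃ i : ℕ, (Nat.digits 10 i).length = L ∧ (i : ℤ) + Rn i = N := by
  constructor
  · rintro ⟨t, q, htl, hbnd, hq18, hq2, hpar, heq, hhd⟩
    have he : L % 2 ≤ 1 := by omega
    have he0 : L % 2 = 0 → q = 0 := hpar
    set a := buildA t (L % 2) q with ha
    have hlen : a.length = L := by
      rw [ha, buildA_len t _ q he]
      omega
    have hlt : ∀ d ∈ a, d < 10 := buildA_lt t _ q hbnd hq18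
    have hlast : ∀ hne : a ≠ [], a.getLast hne ≠ 0 := by
      refine buildA_last t _ q hq2 ?_
      rcases t with _ | ⟨x, t'⟩
      · have hL1 : L = 1 := by simp at htl; omega
        exact ⟨hhd, by omega⟩
      · exact hhd
    have hdig : Nat.digits 10 (Nat.ofDigits 10 a) = a :=
      Nat.digits_ofDigits 10 (by norm_num) a hlt hlast
    refine ⟨Nat.ofDigits 10 a, by rw [hdig, hlen], ?_⟩
    have hFV : FV a = ((Nat.ofDigits 10 a : ℕ) : ℤ) + (Rn (Nat.ofDigits 10 a) : ℤ) := by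
      rw [show FV a = FV (Nat.digits 10 (Nat.ofDigits 10 a)) from by rw [hdig],
        FV_digits]
    rw [← hFV, ha, buildA_FV t _ q he he0 hq2]
    rw [show 2 * t.length + L % 2 = L from by omega, show t.length = L / 2 from htl]
    exact heq.symm
  · rintro ⟨i, hlen, heq⟩
    have hi0 : i ≠ 0 := by
      intro h
      subst h
      simp at hlen
      omega
    obtain ⟨t, q, htl, hbnd, hq18, hq2, hpar, hFV, hlast⟩ :=
      destructA (Nat.digits 10 i) (fun d hd => Nat.digits_lt_base (by norm_num) hd)
    refine ⟨t, q, by rw [htl, hlen], hbnd, hq18, hq2, by rw [hlen] at hpar; exact hpar, ?_, ?_⟩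
    · rw [← heq, ← FV_digits, hFV, hlen]
    · exact hlast (Nat.digits_ne_nil_iff_ne_zero.mpr hi0) (Nat.getLast_digit_ne_zero 10 hi0)

theorem atL_iff (N L : ℕ) (hN : 0 < N) (hL : 1 ≤ L) :
    searchB 0 (L / 2 : ℕ) (L : ℕ) (N : ℤ) (wlist L (L / 2 : ℕ)) = true ↔
      ∃ i : ℕ, (Nat.digits 10 i).length = L ∧ (i : ℤ) + Rn i = N :=
  (atL_palex N L hN hL).trans (palex_iff N L hL)

theorem main_eq (num : Int) : sumOfNumberAndReverse num = sumOfNumberAndReverse_alt num := by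
  rcases lt_trichotomy num 0 with hneg | hzero | hpos
  · rw [sumOfNumberAndReverse, if_neg (by simp; omega)]
    rw [sumOfNumberAndReverse_alt, if_pos (by omega)]
    have hr : PySem.List.pyRange (PySem.Int.floordiv num 2) num 1 = [] := by
      apply PySem.List.pyRange_one_eq_nil
      exact (PySem.Int.le_floordiv_iff_mul_le (by norm_num)).mpr (by omega)
    rw [hr]
    rw [show loopA num [] = false from rfl]
    rw [show (num == 0) = false from by rw [beq_eq_false_iff_ne]; omega]
  · subst hzero
    rfl
  · have hN : 0 < num.toNat := by omega
    have hnum : num = ((num.toNat : ℕ) : ℤ) := by omega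
    rw [hnum]
    set N := num.toNat with hNdef
    have hA : sumOfNumberAndReverse (N : ℤ) = true ↔ ∃ i : ℕ, 1 ≤ i ∧ i + Rn i = N :=
      (A_iff N hN).trans (good_iff N hN)
    have hB : sumOfNumberAndReverse_alt (N : ℤ) = true ↔ ∃ i : ℕ, 1 ≤ i ∧ i + Rn i = N := by
      rw [sumOfNumberAndReverse_alt, if_neg (by omega)]
      rw [show countD (N : ℤ) 0 = (0 : ℤ) + ((Nat.digits 10 N).length : ℤ) from countD_eq N 0]
      simp only [List.any_eq_true]
      constructor
      · rintro ⟨Lz, hmem, hbody⟩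
        rw [PySem.List.mem_pyRange_one] at hmem
        have hcast : Lz = ((Lz.toNat : ℕ) : ℤ) := by omega
        rw [hcast] at hbody
        rw [show PySem.Int.floordiv ((Lz.toNat : ℕ) : ℤ) 2 = ((Lz.toNat / 2 : ℕ) : ℤ) from by
          exact_mod_cast PySem.Int.floordiv_natCast Lz.toNat 2] at hbody
        rw [atL_iff N Lz.toNat hN (by omega)] at hbody
        obtain ⟨i, hlen, heq⟩ := hbody
        refine ⟨i, ?_, by exact_mod_cast heq⟩
        rcases Nat.eq_zero_or_pos i with rfl | h
        · simp at hlen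
          omega
        · exact h
      · rintro ⟨i, hi1, heq⟩
        have hiN : i < N := by
          have := Rn_pos i hi1
          have heq' : i + Rn i = N := by exact_mod_cast heq
          omega
        have hNlt : N < 10 ^ (Nat.digits 10 N).length :=
          (Nat.digits_length_le_iff (by norm_num) N).mp le_rfl
        have hLle : (Nat.digits 10 i).length ≤ (Nat.digits 10 N).length :=
          (Nat.digits_length_le_iff (by norm_num) i).mpr (by omega)
        have hdne : Nat.digits 10 i ≠ [] := Nat.digits_ne_nil_iff_ne_zero.mpr (by omega)
        have hL1 : 1 ≤ (Nat.digits 10 i).length :=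
          Nat.pos_of_ne_zero (fun h => hdne (List.eq_nil_of_length_eq_zero h))
        refine ⟨(((Nat.digits 10 i).length : ℕ) : ℤ), ?_, ?_⟩
        · rw [PySem.List.mem_pyRange_one]
          constructor
          · exact_mod_cast hL1
          · push_cast
            omega
        · rw [show PySem.Int.floordiv (((Nat.digits 10 i).length : ℕ) : ℤ) 2
              = (((Nat.digits 10 i).length / 2 : ℕ) : ℤ) from by
            exact_mod_cast PySem.Int.floordiv_natCast (Nat.digits 10 i).length 2]
          rw [atL_iff N (Nat.digits 10 i).length hN hL1]
          exact ⟨i, rfl, by exact_mod_cast heq⟩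
    have hboth : ∀ a b : Bool, (a = true ↔ b = true) → a = b := by decide
    exact hboth _ _ (hA.trans hB.symm)

-- ===== VERDICT (by name: the statement is the Claim_ definition above) =====
theorem sumOfNumberAndReverse_spec : Claim_equal_sumOfNumberAndReverse := by
  intro num _
  exact main_eq num
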